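-- pv_equiv track=rewrite | github.com/jzulauf-lunarg/gfxreconstruct | framework/generated/base_generators/base_generator_utils.py | lookup_type_converter
-- ===== SOURCE A (Python) =====
-- def lookup_type_converter(type):
--     # convert incoming type into the encode/decode function suffix
--     # NOTE: WIP WIP WIP Copied from DX12 Generator, remove from there to DRY
--     # NOTE: WIP WIP WIP -- perhaps we should be passing in a "platform" parameter or find a way to amend or extend the map
--     CONVERTER_MAPPING = {
--         'UInt8': {'BYTE', 'byte', 'UINT8', 'unsigned char', 'uint8_t'},
--         'Int8': {'INT8', 'int8_t'},
--         'UInt16': {'UINT16', 'uint16_t'},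
--         'Int16': {'SHORT', 'int16_t'},
--         'UInt32': { 'ULONG', 'DWORD', 'UINT', 'UINT32', 'DXGI_USAGE', 'uint32_t' },
--         'Int32': {'HRESULT', 'LONG', 'BOOL', 'INT', 'int32_t'},
--         'UInt64': {'UINT64', 'D3D12_GPU_VIRTUAL_ADDRESS', 'uint64_t'},
--         'Int64': {'int64_t'},
--         'SizeT': {'LONG_PTR', 'SIZE_T', 'size_t'},
--         'LUID': {'LUID'},
--         'Float': {'FLOAT', 'float'},
--         'Void': {'void'},
--         'String': {'char'},
--         'WString': {'wchar_t'},
--         'Function': {'PFN_DESTRUCTION_CALLBACK', 'D3D12MessageFunc'}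
--     }
--     converter = [ k for (k, v) in CONVERTER_MAPPING.items() if type in v ]
--     if converter:
--         return converter[0]
--     return None
-- ===== SOURCE B (Python) =====
-- # B: binary search over a flat (name, suffix) table pre-sorted by name.
-- # The value sets of A's mapping are disjoint, so each name has exactly one suffix
-- # and an equality hit in the binary search returns the same suffix A's scan finds.
-- _SORTED_TABLE = [
--     ('BOOL', 'Int32'), ('BYTE', 'UInt8'), ('D3D12MessageFunc', 'Function'),
--     ('D3D12_GPU_VIRTUAL_ADDRESS', 'UInt64'), ('DWORD', 'UInt32'),
--     ('DXGI_USAGE', 'UInt32'), ('FLOAT', 'Float'), ('HRESULT', 'Int32'),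
--     ('INT', 'Int32'), ('INT8', 'Int8'), ('LONG', 'Int32'), ('LONG_PTR', 'SizeT'),
--     ('LUID', 'LUID'), ('PFN_DESTRUCTION_CALLBACK', 'Function'), ('SHORT', 'Int16'),
--     ('SIZE_T', 'SizeT'), ('UINT', 'UInt32'), ('UINT16', 'UInt16'),
--     ('UINT32', 'UInt32'), ('UINT64', 'UInt64'), ('UINT8', 'UInt8'),
--     ('ULONG', 'UInt32'), ('byte', 'UInt8'), ('char', 'String'),
--     ('float', 'Float'), ('int16_t', 'Int16'), ('int32_t', 'Int32'),
--     ('int64_t', 'Int64'), ('int8_t', 'Int8'), ('size_t', 'SizeT'),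
--     ('uint16_t', 'UInt16'), ('uint32_t', 'UInt32'), ('uint64_t', 'UInt64'),
--     ('uint8_t', 'UInt8'), ('unsigned char', 'UInt8'), ('void', 'Void'),
--     ('wchar_t', 'WString'),
-- ]
--
--
-- def lookup_type_converter(type):
--     lo, hi = 0, len(_SORTED_TABLE)
--     while lo < hi:
--         mid = (lo + hi) // 2
--         name, suffix = _SORTED_TABLE[mid]
--         if name == type:
--             return suffix
--         if name < type:
--             lo = mid + 1
--         else:
--             hi = mid
--     return None
-- ===== Notes on version B (the rewrite author's own statement) =====
-- stated objective: alternative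
-- what changed: Replaces the per-call linear scan over all (suffix, name-set) pairs with a binary search over a flat (name, suffix) table pre-sorted by name; correct because the value sets are disjoint so each name has exactly one suffix.
import Mathlib
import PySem

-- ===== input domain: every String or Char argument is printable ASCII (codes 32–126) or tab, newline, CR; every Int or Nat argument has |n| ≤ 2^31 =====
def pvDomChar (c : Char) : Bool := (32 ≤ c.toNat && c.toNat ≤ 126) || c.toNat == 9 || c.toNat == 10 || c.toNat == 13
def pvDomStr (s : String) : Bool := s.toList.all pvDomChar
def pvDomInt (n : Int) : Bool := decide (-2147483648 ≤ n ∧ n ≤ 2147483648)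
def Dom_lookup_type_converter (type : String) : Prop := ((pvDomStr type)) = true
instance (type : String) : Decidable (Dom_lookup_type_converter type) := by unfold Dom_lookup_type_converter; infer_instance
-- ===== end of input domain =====

-- B replaces A's per-call scan over (suffix, name-set) pairs by a binary search over a flat table pre-sorted by name (alternative; return value only).
-- ===== PORT A =====
-- CONVERTER_MAPPING: dict from converter suffix to the set of C type names (literal from A)
def pvMappingA : List (String × PySem.Set String) :=
  [ ("UInt8", PySem.Set.ofList ["BYTE", "byte", "UINT8", "unsigned char", "uint8_t"]),
    ("Int8", PySem.Set.ofList ["INT8", "int8_t"]),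
    ("UInt16", PySem.Set.ofList ["UINT16", "uint16_t"]),
    ("Int16", PySem.Set.ofList ["SHORT", "int16_t"]),
    ("UInt32", PySem.Set.ofList ["ULONG", "DWORD", "UINT", "UINT32", "DXGI_USAGE", "uint32_t"]),
    ("Int32", PySem.Set.ofList ["HRESULT", "LONG", "BOOL", "INT", "int32_t"]),
    ("UInt64", PySem.Set.ofList ["UINT64", "D3D12_GPU_VIRTUAL_ADDRESS", "uint64_t"]),
    ("Int64", PySem.Set.ofList ["int64_t"]),
    ("SizeT", PySem.Set.ofList ["LONG_PTR", "SIZE_T", "size_t"]),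
    ("LUID", PySem.Set.ofList ["LUID"]),
    ("Float", PySem.Set.ofList ["FLOAT", "float"]),
    ("Void", PySem.Set.ofList ["void"]),
    ("String", PySem.Set.ofList ["char"]),
    ("WString", PySem.Set.ofList ["wchar_t"]),
    ("Function", PySem.Set.ofList ["PFN_DESTRUCTION_CALLBACK", "D3D12MessageFunc"]) ]

def lookup_type_converter (type : String) : Option String :=
  -- converter = [ k for (k, v) in CONVERTER_MAPPING.items() if type in v ]
  let converter := (pvMappingA.filter (fun kv => PySem.Set.contains kv.2 type)).map (fun kv => kv.1)
  -- if converter: return converter[0]  else: return None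
  match converter with
  | c :: _ => some c
  | [] => none

-- ===== PORT B =====
-- _SORTED_TABLE: flat (name, suffix) pairs, pre-sorted by name (literal from Source B)
def pvSortedTableB : List (String × String) :=
  [ ("BOOL", "Int32"), ("BYTE", "UInt8"), ("D3D12MessageFunc", "Function"),
    ("D3D12_GPU_VIRTUAL_ADDRESS", "UInt64"), ("DWORD", "UInt32"),
    ("DXGI_USAGE", "UInt32"), ("FLOAT", "Float"), ("HRESULT", "Int32"),
    ("INT", "Int32"), ("INT8", "Int8"), ("LONG", "Int32"), ("LONG_PTR", "SizeT"),
    ("LUID", "LUID"), ("PFN_DESTRUCTION_CALLBACK", "Function"), ("SHORT", "Int16"),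
    ("SIZE_T", "SizeT"), ("UINT", "UInt32"), ("UINT16", "UInt16"),
    ("UINT32", "UInt32"), ("UINT64", "UInt64"), ("UINT8", "UInt8"),
    ("ULONG", "UInt32"), ("byte", "UInt8"), ("char", "String"),
    ("float", "Float"), ("int16_t", "Int16"), ("int32_t", "Int32"),
    ("int64_t", "Int64"), ("int8_t", "Int8"), ("size_t", "SizeT"),
    ("uint16_t", "UInt16"), ("uint32_t", "UInt32"), ("uint64_t", "UInt64"),
    ("uint8_t", "UInt8"), ("unsigned char", "UInt8"), ("void", "Void"),
    ("wchar_t", "WString") ]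

-- Python's 'name < type' on strings: code-point lexicographic comparison, ported
-- explicitly over the character lists (exact; Lean's String.< instance is byte-level
-- and does not kernel-reduce)
def pvCharsLt : List Char → List Char → Bool
  | _, [] => false
  | [], _ :: _ => true
  | a :: as, b :: bs =>
    if a.toNat < b.toNat then true
    else if b.toNat < a.toNat then false
    else pvCharsLt as bs

def pvStrLt (a b : String) : Bool := pvCharsLt a.toList b.toList

-- the while-loop of Source B: binary search on [lo, hi); _SORTED_TABLE[mid] is always in
-- range in Python, ported with getD (exact here since mid < hi ≤ length); the fuel
-- argument only bounds the iteration count (hi - lo ≤ fuel at every call, so it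
-- never cuts the loop short) and makes the recursion structural
def pvBsearch (type : String) : Nat → Nat → Nat → Option String
  | 0, _, _ => none
  | fuel + 1, lo, hi =>
    if lo < hi then
      let mid := (lo + hi) / 2
      let p := pvSortedTableB.getD mid ("", "")
      if p.1 = type then some p.2
      else if pvStrLt p.1 type then pvBsearch type fuel (mid + 1) hi
      else pvBsearch type fuel lo mid
    else none

def lookup_type_converter_alt (type : String) : Option String :=
  pvBsearch type pvSortedTableB.length 0 pvSortedTableB.length

-- ===== PRECONDITION & SPEC =====
def Spec_lookup_type_converter (type : String) (out : Option String) : Prop := out = lookup_type_converter_alt type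
instance (type : String) (out : Option String) : Decidable (Spec_lookup_type_converter type out) := by unfold Spec_lookup_type_converter; infer_instance

-- ===== CLAIM (what is proved, stated in full; the proofs are below) =====
def Claim_equal_lookup_type_converter : Prop := ∀ (type : String), Dom_lookup_type_converter type → Spec_lookup_type_converter type (lookup_type_converter type)

-- ===== LEMMAS AND PROOFS =====
-- the 37 C type names, in A's flattened order
def pvAllNames : List String :=
  ["BYTE", "byte", "UINT8", "unsigned char", "uint8_t", "INT8", "int8_t", "UINT16", "uint16_t", "SHORT", "int16_t", "ULONG", "DWORD", "UINT", "UINT32", "DXGI_USAGE", "uint32_t", "HRESULT", "LONG", "BOOL", "INT", "int32_t", "UINT64", "D3D12_GPU_VIRTUAL_ADDRESS", "uint64_t", "int64_t", "LONG_PTR", "SIZE_T", "size_t", "LUID", "FLOAT", "float", "void", "char", "wchar_t", "PFN_DESTRUCTION_CALLBACK", "D3D12MessageFunc"]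

-- if type matches no name of the table, the binary search returns none
theorem pvBsearch_none (type : String) (h : ∀ p ∈ pvSortedTableB, p.1 ≠ type) :
    ∀ (fuel lo hi : Nat), hi ≤ pvSortedTableB.length → pvBsearch type fuel lo hi = none := by
  intro fuel
  induction fuel with
  | zero => intro lo hi _; rfl
  | succ fuel ih =>
    intro lo hi hle
    show (if lo < hi then _ else none) = none
    split
    · next hlt =>
      have hmid : (lo + hi) / 2 < pvSortedTableB.length := by omega
      have hmem : pvSortedTableB.getD ((lo + hi) / 2) ("", "") ∈ pvSortedTableB := by
        rw [List.getD_eq_getElem _ _ hmid]; exact List.getElem_mem _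
      have hne := h _ hmem
      simp only [hne, if_false]
      split
      · exact ih _ _ hle
      · exact ih _ _ (by omega)
    · rfl

set_option maxRecDepth 16384 in
theorem pv_not_mem_A_none (type : String) (h : type ∉ pvAllNames) :
    lookup_type_converter type = none := by
  simp only [pvAllNames, List.mem_cons, List.not_mem_nil, or_false, not_or] at h
  obtain ⟨h1, h2, h3, h4, h5, h6, h7, h8, h9, h10, h11, h12, h13, h14, h15, h16, h17, h18, h19, h20, h21, h22, h23, h24, h25, h26, h27, h28, h29, h30, h31, h32, h33, h34, h35, h36, h37⟩ := h
  simp [lookup_type_converter, pvMappingA, PySem.Set.contains, PySem.Set.ofList, List.filter,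
    h1, h2, h3, h4, h5, h6, h7, h8, h9, h10, h11, h12, h13, h14, h15, h16, h17, h18, h19, h20, h21, h22, h23, h24, h25, h26, h27, h28, h29, h30, h31, h32, h33, h34, h35, h36, h37, eq_comm]

set_option maxRecDepth 16384 in
theorem pv_not_mem_B_none (type : String) (h : type ∉ pvAllNames) :
    lookup_type_converter_alt type = none := by
  apply pvBsearch_none _ _ _ _ _ le_rfl
  intro p hp
  simp only [pvAllNames, List.mem_cons, List.not_mem_nil, or_false, not_or] at h
  fin_cases hp <;> (intro e; subst e; simp_all)

-- ===== VERDICT (by name: the statement is the Claim_ definition above) =====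
set_option maxRecDepth 16384 in
theorem lookup_type_converter_spec : Claim_equal_lookup_type_converter := by
  intro type _
  unfold Spec_lookup_type_converter
  by_cases h : type ∈ pvAllNames
  · simp only [pvAllNames, List.mem_cons, List.not_mem_nil, or_false] at h
    rcases h with rfl | rfl | rfl | rfl | rfl | rfl | rfl | rfl | rfl | rfl | rfl | rfl | rfl | rfl | rfl | rfl | rfl | rfl | rfl | rfl | rfl | rfl | rfl | rfl | rfl | rfl | rfl | rfl | rfl | rfl | rfl | rfl | rfl | rfl | rfl | rfl | rfl <;> decide
  · rw [pv_not_mem_A_none type h, pv_not_mem_B_none type h]
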